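-- pv_equiv track=rewrite | github.com/itsolutionscorp/AutoStyle-Clustering | all_data/cs61a/untarred3/164.py | make_deductions
-- ===== SOURCE A (Python) =====
-- def make_deductions(possible_subsets, letters):
--     """Infers which letters must be in the word to be guessed, and
--     which letters must not be in the word.
--     A letter must be in the word if it is in every possible subset.
--     A letter is not in the word if it is not in any possible subset.
--
--     >>> letters = ['a', 'b', 'c', 'd', 'e', 'f']
--     >>> subsets = [['a', 'b', 'c'], ['b', 'a', 'e'], ['e', 'a', 'c']]
--     >>> present, not_present = make_deductions(subsets, letters)
--     >>> present
--     ['a']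
--     >>> not_present
--     ['d', 'f']
--     """
--     present = []
--     not_present = []
--     das_length = len(possible_subsets)
--     count, dcount = 0, 0
--     for c in letters:
--         for sub in possible_subsets:
--             if c in sub:
--                 count += 1
--             else:
--                 dcount += 1
--         if count == das_length:
--             present += c
--         if dcount == das_length:
--             not_present += c
--         count, dcount = 0, 0
--     return present, not_present
-- ===== SOURCE B (Python) =====
-- def make_deductions(possible_subsets, letters):
--     n = len(possible_subsets)
--     counts = {}
--     for sub in possible_subsets:
--         for x in set(sub):
--             counts[x] = counts.get(x, 0) + 1
--     present = []
--     not_present = []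
--     for c in letters:
--         k = counts.get(c, 0)
--         if k == n:
--             present += c
--         if k == 0:
--             not_present += c
--     return present, not_present
-- ===== Notes on version B (the rewrite author's own statement) =====
-- stated objective: faster
-- what changed: Replaces A's per-letter inner scan of every subset by a single pass that builds a dictionary counting how many subsets contain each candidate, then reads present (count == len) and not_present (count == 0) off the dictionary in one pass over letters.
import Mathlib
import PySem

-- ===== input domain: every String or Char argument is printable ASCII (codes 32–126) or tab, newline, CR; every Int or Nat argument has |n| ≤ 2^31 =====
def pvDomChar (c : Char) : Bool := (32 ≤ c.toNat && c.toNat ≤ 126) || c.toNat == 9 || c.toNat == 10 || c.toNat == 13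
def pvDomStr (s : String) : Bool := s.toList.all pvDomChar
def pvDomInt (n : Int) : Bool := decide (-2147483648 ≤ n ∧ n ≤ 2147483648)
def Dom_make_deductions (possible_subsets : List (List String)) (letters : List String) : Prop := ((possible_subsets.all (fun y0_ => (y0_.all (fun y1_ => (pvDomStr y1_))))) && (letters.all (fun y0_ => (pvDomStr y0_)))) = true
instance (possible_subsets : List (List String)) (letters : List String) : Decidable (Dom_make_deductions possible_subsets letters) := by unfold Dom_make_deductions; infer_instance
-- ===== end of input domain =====

-- B replaces A's per-letter scan over all subsets by one dictionary-counting pass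
-- (how many subsets contain each candidate) followed by one lookup pass over letters.


-- ===== PORT A =====
-- Python's `present += c` extends the list by the CHARACTERS of the string c.
def pvChars (c : String) : List String := c.toList.map (fun ch => String.ofList [ch])

def make_deductions (possible_subsets : List (List String)) (letters : List String) : List String × List String :=
  let das_length : Int := possible_subsets.length
  letters.foldl (fun (st : List String × List String) c =>
    let cd := possible_subsets.foldl
      (fun (cd : Int × Int) sub => if c ∈ sub then (cd.1 + 1, cd.2) else (cd.1, cd.2 + 1)) (0, 0)
    let present := if cd.1 = das_length then st.1 ++ pvChars c else st.1
    let not_present := if cd.2 = das_length then st.2 ++ pvChars c else st.2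
    (present, not_present)) ([], [])

-- ===== PORT B =====
def make_deductions_alt (possible_subsets : List (List String)) (letters : List String) : List String × List String :=
  let n : Int := possible_subsets.length
  let counts : PySem.Dict String Int := possible_subsets.foldl
    (fun d sub => (PySem.Set.ofList sub).foldl (fun d x => d.insert x (d.getD x 0 + 1)) d)
    PySem.Dict.empty
  letters.foldl (fun (st : List String × List String) c =>
    let k := counts.getD c 0
    ((if k = n then st.1 ++ pvChars c else st.1),
     (if k = 0 then st.2 ++ pvChars c else st.2))) ([], [])

-- ===== PRECONDITION & SPEC =====
def Spec_make_deductions (possible_subsets : List (List String)) (letters : List String) (out : List String × List String) : Prop := out = make_deductions_alt possible_subsets letters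
instance (possible_subsets : List (List String)) (letters : List String) (out : List String × List String) : Decidable (Spec_make_deductions possible_subsets letters out) := by unfold Spec_make_deductions; infer_instance

-- ===== CLAIM (what is proved, stated in full; the proofs are below) =====
def Claim_equal_make_deductions : Prop := ∀ (possible_subsets : List (List String)) (letters : List String), Dom_make_deductions possible_subsets letters → Spec_make_deductions possible_subsets letters (make_deductions possible_subsets letters)

-- ===== LEMMAS AND PROOFS =====

-- A's inner count loop counts the subsets that contain / do not contain c.
lemma pv_countA (c : String) (ps : List (List String)) (a b : Int) :
    ps.foldl (fun (cd : Int × Int) sub => if c ∈ sub then (cd.1 + 1, cd.2) else (cd.1, cd.2 + 1)) (a, b)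
    = (a + (ps.countP (fun sub => decide (c ∈ sub)) : Int),
       b + (ps.countP (fun sub => !decide (c ∈ sub)) : Int)) := by
  induction ps generalizing a b with
  | nil => simp
  | cons h t ih =>
      by_cases hc : c ∈ h <;> simp [hc, ih] <;> ring

-- B's counting dict holds, for each string, the number of subsets containing it.
lemma pv_getD_countB (c : String) (ps : List (List String)) (d : PySem.Dict String Int) :
    (ps.foldl (fun d sub => (PySem.Set.ofList sub).foldl (fun d x => d.insert x (d.getD x 0 + 1)) d) d).getD c 0
    = d.getD c 0 + (ps.countP (fun sub => decide (c ∈ sub)) : Int) := by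
  induction ps generalizing d with
  | nil => simp
  | cons h t ih =>
      rw [List.foldl_cons, ih, PySem.Dict.getD_foldl_insert_add_one]
      by_cases hc : c ∈ h
      · rw [List.count_eq_one_of_mem (PySem.Set.nodup_ofList h) ((PySem.Set.mem_ofList h c).mpr hc)]
        simp [hc]
        omega
      · have h0 : (PySem.Set.ofList h).count c = 0 := by
          rw [List.count_eq_zero]
          exact fun hm => hc ((PySem.Set.mem_ofList h c).mp hm)
        simp [hc, h0]

-- ===== VERDICT (by name: the statement is the Claim_ definition above) =====
theorem make_deductions_spec : Claim_equal_make_deductions := by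
  intro ps letters _
  unfold Spec_make_deductions make_deductions make_deductions_alt
  simp only []
  apply List.foldl_ext
  intro st c _
  rw [pv_countA, pv_getD_countB]
  simp only [PySem.Dict.getD_empty, zero_add]
  have hlen := List.length_eq_countP_add_countP (l := ps) (p := fun sub => decide (c ∈ sub))
  simp only [decide_not, decide_eq_true_eq] at hlen
  have h2 : ((ps.countP (fun sub => !decide (c ∈ sub)) : Int) = (ps.length : Int))
      ↔ ((ps.countP (fun sub => decide (c ∈ sub)) : Int) = 0) := by
    constructor <;> intro h <;> omega
  rw [if_congr h2 rfl rfl]
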